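-- pv_equiv track=rewrite | github.com/jbazel/l3-Project-Jazz-Heuristics | chord_corpus_builder.py | build_duo_corp
-- ===== SOURCE A (Python) =====
-- def stringify(val):
--     return ','.join([str(x) for x in val])
--
-- def flatten(arr):
--     return [i for j in arr for i in j]
--
-- def update_corpus(corp, key):
--     if key in corp:
--         corp[key] += 1
--     else:
--         corp[key] = 1
--     return corp
--
-- def build_duo_corp(c, m):
--
--     m = flatten(m)
--     c = flatten(c)
--     # for each of chord; build corpus of melodies, then combine to make multi-layerd dict.
--     # lookup dictionary; chord -> index of that chord in the temporary list of melody dictionaries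
--     c_lookup = dict()
--     corp = []
--     for index, chord in enumerate(c):
--
--         chord = stringify(chord)
--
--         # if chord currently has a corpus built from it; find from lookup table
--         if chord in c_lookup:
--             lookup_index = c_lookup[chord]
--             m_key = stringify(m[index])
--
--             corp[lookup_index] = update_corpus(corp[lookup_index], m_key)
--
--         # if chord does not currently have a corpus; create corp
--         else:
--             # create corp
--             n = len(c_lookup)
--             c_lookup[chord] = n
--             corp.append(dict())
--             m_key = stringify(m[index])
--             corp[n] = update_corpus(corp[n], m_key)
--
--     c_corpus = dict()
--     for index, key in enumerate(c_lookup):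
--         c_corpus[key] = corp[index]
--
--     return c_corpus
-- ===== SOURCE B (Python) =====
-- # B: group-by strategy -- dedup the chord keys, then build each chord's melody
-- # counter by scanning the aligned pairs for that chord; no incremental per-element
-- # dict threading, no index indirection, no rebuild pass.
-- def stringify(val):
--     return ','.join([str(x) for x in val])
--
--
-- def build_duo_corp(c, m):
--     melodies = [y for row in m for y in row]
--     keys = [stringify(ch) for row in c for ch in row]
--     mks = [stringify(melodies[i]) for i in range(len(keys))]
--     result = {}
--     for k in keys:
--         if k in result:
--             continue
--         inner = {}
--         for j, kj in enumerate(keys):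
--             if kj == k:
--                 mk = mks[j]
--                 inner[mk] = inner.get(mk, 0) + 1
--         result[k] = inner
--     return result
-- ===== Notes on version B (the rewrite author's own statement) =====
-- stated objective: alternative
-- what changed: Replaces A's incremental single pass (chord->index lookup dict, parallel list of counter dicts mutated per element, final rebuild pass) with a group-by strategy: stringify everything up front, then for each not-yet-seen chord key build its whole melody counter in one dedicated scan of the aligned pairs; trades A's per-element dict threading for a per-distinct-chord scan (O(n*d) vs O(n)).
import Mathlib
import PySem

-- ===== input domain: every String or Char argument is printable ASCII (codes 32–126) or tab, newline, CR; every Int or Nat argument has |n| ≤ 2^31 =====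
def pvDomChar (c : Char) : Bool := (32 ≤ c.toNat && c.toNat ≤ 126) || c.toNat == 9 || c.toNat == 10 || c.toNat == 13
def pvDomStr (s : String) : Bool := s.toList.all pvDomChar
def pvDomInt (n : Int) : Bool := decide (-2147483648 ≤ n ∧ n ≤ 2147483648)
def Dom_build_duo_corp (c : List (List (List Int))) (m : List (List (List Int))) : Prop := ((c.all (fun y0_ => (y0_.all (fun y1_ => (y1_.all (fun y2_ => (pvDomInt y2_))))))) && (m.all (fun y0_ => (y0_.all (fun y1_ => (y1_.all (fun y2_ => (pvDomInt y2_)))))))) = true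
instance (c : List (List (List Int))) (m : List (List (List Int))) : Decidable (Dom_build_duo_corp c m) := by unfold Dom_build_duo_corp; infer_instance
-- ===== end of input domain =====

-- B replaces A's incremental pass (chord→index lookup + parallel list of counter dicts + rebuild
-- pass) by a group-by: dedup the chord keys, then one dedicated counting scan per distinct chord
-- (objective: alternative; not faster).

-- ===== PORT A =====
-- shared module helper: stringify(val) = ','.join([str(x) for x in val])
def pvStringify (val : List Int) : String :=
  PySem.Str.join "," (val.map PySem.Int.toStr)

-- flatten(arr) = [i for j in arr for i in j]
def pvFlatten (arr : List (List (List Int))) : List (List Int) :=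
  arr.flatMap (fun j => j)

-- update_corpus(corp, key)
def pvUpdateCorpus (corp : PySem.Dict String Int) (key : String) : PySem.Dict String Int :=
  match corp.get? key with
  | some v => corp.insert key (v + 1)
  | none   => corp.insert key 1

def build_duo_corp (c : List (List (List Int))) (m : List (List (List Int))) : List (String × List (String × Int)) :=
  let mf := pvFlatten m
  let cf := pvFlatten c
  let st :=
    (PySem.List.enumerate cf 0).foldl
      (fun (st : PySem.Dict String Int × List (PySem.Dict String Int)) (p : Int × List Int) =>
        let c_lookup := st.1
        let corp := st.2
        let chord := pvStringify p.2
        match c_lookup.get? chord with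
        | some lookup_index =>
            let m_key := pvStringify (PySem.List.pyGetD mf p.1 [])
            (c_lookup,
             PySem.List.pySetD corp lookup_index
               (pvUpdateCorpus (PySem.List.pyGetD corp lookup_index PySem.Dict.empty) m_key))
        | none =>
            let n := c_lookup.size
            let c_lookup := c_lookup.insert chord (n : Int)
            let corp := corp ++ [PySem.Dict.empty]
            let m_key := pvStringify (PySem.List.pyGetD mf p.1 [])
            (c_lookup,
             PySem.List.pySetD corp (n : Int)
               (pvUpdateCorpus (PySem.List.pyGetD corp (n : Int) PySem.Dict.empty) m_key)))
      (PySem.Dict.empty, [])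
  let c_corpus :=
    (PySem.List.enumerate st.1.keys 0).foldl
      (fun (d : PySem.Dict String (PySem.Dict String Int)) p =>
        d.insert p.2 (PySem.List.pyGetD st.2 p.1 PySem.Dict.empty))
      PySem.Dict.empty
  c_corpus.items.map (fun kv => (kv.1, kv.2.items))

-- ===== PORT B =====
def build_duo_corp_alt (c : List (List (List Int))) (m : List (List (List Int))) : List (String × List (String × Int)) :=
  let melodies := m.flatMap (fun row => row)
  let keys := (c.flatMap (fun row => row)).map pvStringify
  let mks := (PySem.List.pyRange 0 (keys.length : Int) 1).map
      (fun i => pvStringify (PySem.List.pyGetD melodies i []))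
  let result :=
    keys.foldl
      (fun (result : PySem.Dict String (PySem.Dict String Int)) k =>
        if result.contains k then result
        else
          let inner :=
            (PySem.List.enumerate keys 0).foldl
              (fun (inner : PySem.Dict String Int) p =>
                if p.2 == k then
                  let mk := PySem.List.pyGetD mks p.1 ""
                  inner.insert mk (inner.getD mk 0 + 1)
                else inner)
              PySem.Dict.empty
          result.insert k inner)
      PySem.Dict.empty
  result.items.map (fun kv => (kv.1, kv.2.items))

-- ===== PRECONDITION & SPEC =====
-- A raises IndexError (on m[index]) when the flattened c is longer than the flattened m; Pre_ excludes exactly that (B raises there too).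
def Pre_build_duo_corp (c : List (List (List Int))) (m : List (List (List Int))) : Prop :=
  (c.flatMap (fun row => row)).length ≤ (m.flatMap (fun row => row)).length
instance (c : List (List (List Int))) (m : List (List (List Int))) : Decidable (Pre_build_duo_corp c m) := by unfold Pre_build_duo_corp; infer_instance

def pvWitness_build_duo_corp : List (List (List Int)) × List (List (List Int)) :=
  ([[[1, 2], [3]], [[1, 2]]], [[[5]], [[6], [5]]])

def Spec_build_duo_corp (c : List (List (List Int))) (m : List (List (List Int))) (out : List (String × List (String × Int))) : Prop := out = build_duo_corp_alt c m
instance (c : List (List (List Int))) (m : List (List (List Int))) (out : List (String × List (String × Int))) : Decidable (Spec_build_duo_corp c m out) := by unfold Spec_build_duo_corp; infer_instance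

-- ===== CLAIM (what is proved, stated in full; the proofs are below) =====
def Claim_equal_build_duo_corp : Prop := ∀ (c : List (List (List Int))) (m : List (List (List Int))), Dom_build_duo_corp c m → Pre_build_duo_corp c m → Spec_build_duo_corp c m (build_duo_corp c m)

-- ===== LEMMAS AND PROOFS =====

-- A's loop step, on already-stringified (chord key, melody key) pairs
def pvStepS (st : PySem.Dict String Int × List (PySem.Dict String Int)) (q : String × String) :
    PySem.Dict String Int × List (PySem.Dict String Int) :=
  match st.1.get? q.1 with
  | some li =>
      (st.1, PySem.List.pySetD st.2 li
        (pvUpdateCorpus (PySem.List.pyGetD st.2 li PySem.Dict.empty) q.2))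
  | none =>
      (st.1.insert q.1 (st.1.size : Int),
       PySem.List.pySetD (st.2 ++ [PySem.Dict.empty]) (st.1.size : Int)
        (pvUpdateCorpus (PySem.List.pyGetD (st.2 ++ [PySem.Dict.empty]) (st.1.size : Int) PySem.Dict.empty) q.2))

-- distinct keys in first-occurrence order, relative to an already-seen prefix
def pvDkK : List String → List String → List String
  | [], _ => []
  | k :: r, seen => if k ∈ seen then pvDkK r seen else k :: pvDkK r (seen ++ [k])

-- the melody counter of key k over the pair list zs, starting from d
def pvCnt (zs : List (String × String)) (k : String) (d : PySem.Dict String Int) : PySem.Dict String Int :=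
  zs.foldl (fun d p => if p.1 == k then pvUpdateCorpus d p.2 else d) d

def pvMkLk (ks : List String) : PySem.Dict String Int :=
  PySem.Dict.mk ((PySem.List.enumerate ks 0).map (fun p => (p.2, p.1)))

theorem pvMkLk_keys (ks : List String) : (pvMkLk ks).keys = ks := by
  simp [pvMkLk, PySem.Dict.keys, List.map_map]
  exact PySem.List.map_snd_enumerate ks 0

theorem pvMkLk_size (ks : List String) : (pvMkLk ks).size = ks.length := by
  simp [pvMkLk, PySem.Dict.size, PySem.List.length_enumerate]

theorem pvMkLk_get?_of_not_mem (ks : List String) (key : String) (h : key ∉ ks) :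
    (pvMkLk ks).get? key = none := by
  rw [PySem.Dict.get?_eq_none_iff_not_mem_keys, pvMkLk_keys]; exact h

theorem pvMkLk_get?_of_getElem (ks : List String) (hnd : ks.Nodup) (i : Nat) (hi : i < ks.length) :
    (pvMkLk ks).get? ks[i] = some (i : Int) := by
  apply PySem.Dict.get?_of_mem_items
  · show (ks[i], (i:Int)) ∈ (PySem.List.enumerate ks 0).map (fun p => (p.2, p.1))
    simp only [List.mem_map]
    refine ⟨((i:Int), ks[i]), ?_, rfl⟩
    rw [PySem.List.mem_enumerate_iff]
    exact ⟨i, hi, by simp⟩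
  · rw [pvMkLk_keys]; exact hnd

theorem pvMkLk_insert_fresh (ks : List String) (key : String) (h : key ∉ ks) :
    (pvMkLk ks).insert key (ks.length : Int) = pvMkLk (ks ++ [key]) := by
  have hc : (pvMkLk ks).contains key = false := by
    rw [PySem.Dict.contains_eq_isSome_get?, pvMkLk_get?_of_not_mem ks key h]; rfl
  apply PySem.Dict.ext
  rw [PySem.Dict.items_insert_of_not_contains _ _ hc]
  show _ ++ _ = (PySem.List.enumerate (ks ++ [key]) 0).map (fun p => (p.2, p.1))
  rw [PySem.List.enumerate_append]
  simp [PySem.List.enumerate_cons, pvMkLk]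

theorem pvUpdateCorpus_eq (corp : PySem.Dict String Int) (key : String) :
    pvUpdateCorpus corp key = corp.insert key (corp.getD key 0 + 1) := by
  unfold pvUpdateCorpus
  cases h : corp.get? key with
  | some v => simp only [PySem.Dict.getD_eq_get?_getD, h, Option.getD_some]
  | none => simp only [PySem.Dict.getD_eq_get?_getD, h, Option.getD_none]; norm_num

-- an enumerate-and-index loop is a loop over the zip (generic in the loop body)
theorem pv_enum_getD_fold {α β σ : Type} (big : List β) (dflt : β) (f : σ → α → β → σ)
    (xs : List α) :
    ∀ (s : Nat) (ms : List β), big.drop s = ms → xs.length ≤ ms.length →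
    ∀ (init : σ),
    (PySem.List.enumerate xs (s : Int)).foldl
        (fun st p => f st p.2 (PySem.List.pyGetD big p.1 dflt)) init
      = (xs.zip ms).foldl (fun st p => f st p.1 p.2) init := by
  induction xs with
  | nil => intro s ms _ _ init; simp [PySem.List.enumerate]
  | cons x xs ih =>
    intro s ms hdrop hle init
    cases ms with
    | nil => simp at hle
    | cons m0 ms' =>
      rw [PySem.List.enumerate_cons]
      simp only [List.zip_cons_cons, List.foldl_cons]
      have hs : s < big.length := by
        have := congrArg List.length hdrop
        simp at this; omega
      have hget : PySem.List.pyGetD big (s : Int) dflt = m0 := by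
        rw [PySem.List.pyGetD_natCast]
        have : big[s] = m0 := by
          have h0 : (big.drop s)[0]'(by rw [hdrop]; simp) = m0 := by simp [hdrop]
          rw [List.getElem_drop] at h0
          simpa using h0
        simp [List.getD, this, List.getElem?_eq_getElem hs]
      have hcast : (s : Int) + 1 = ((s + 1 : Nat) : Int) := by push_cast; ring
      rw [hget, hcast, ih (s+1) ms' (by rw [← List.drop_drop, hdrop]; rfl) (by simpa using hle)]

-- B's outer loop: skipping seen keys and inserting a fixed counter per key is a map over the dedup
theorem pv_groupBy (C : String → PySem.Dict String Int) :
    ∀ (kl seen : List String),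
    kl.foldl (fun res k => if res.contains k then res else res.insert k (C k))
        (PySem.Dict.mk (seen.map (fun k => (k, C k))))
      = PySem.Dict.mk ((seen ++ pvDkK kl seen).map (fun k => (k, C k))) := by
  intro kl
  induction kl with
  | nil => intro seen; simp [pvDkK]
  | cons k r ih =>
    intro seen
    have hkeys : (PySem.Dict.mk (seen.map (fun k => (k, C k)))).keys = seen := by
      show (seen.map (fun k => (k, C k))).map Prod.fst = seen
      simp [Function.comp_def]
    by_cases hmem : k ∈ seen
    · have hc : (PySem.Dict.mk (seen.map (fun k => (k, C k)))).contains k = true := by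
        rw [PySem.Dict.contains_eq_decide_mem_keys, hkeys]; simpa
      simp only [List.foldl_cons, hc, if_true]
      rw [ih seen]
      simp [pvDkK, hmem]
    · have hc : (PySem.Dict.mk (seen.map (fun k => (k, C k)))).contains k = false := by
        rw [PySem.Dict.contains_eq_decide_mem_keys, hkeys]; simpa
      have hins : (PySem.Dict.mk (seen.map (fun k => (k, C k)))).insert k (C k)
          = PySem.Dict.mk ((seen ++ [k]).map (fun k => (k, C k))) := by
        apply PySem.Dict.ext
        rw [PySem.Dict.items_insert_of_not_contains _ _ hc]
        show _ ++ _ = ((seen ++ [k]).map (fun k => (k, C k)))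
        simp
      simp only [List.foldl_cons, hc, Bool.false_eq_true, if_false, hins]
      rw [ih (seen ++ [k])]
      simp [pvDkK, hmem, List.append_assoc]

-- list-getD helpers used by the invariant proof
theorem pv_getD_lt {a : Type} (l : List a) (i : Nat) (d : a) (h : i < l.length) :
    l.getD i d = l[i] := List.getD_eq_getElem l d h

theorem pv_getD_ge {a : Type} (l : List a) (i : Nat) (d : a) (h : l.length ≤ i) :
    l.getD i d = d := by
  simp [List.getD, List.getElem?_eq_none h]

-- main invariant of A's loop: the lookup table is the index map of the distinct keys in
-- first-occurrence order and each slot holds the counter of its key over the processed pairs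
theorem pv_mainA : ∀ (zs : List (String × String)) (ks : List String)
    (vs : List (PySem.Dict String Int)), vs.length = ks.length → ks.Nodup →
    ∃ vs1 : List (PySem.Dict String Int),
      zs.foldl pvStepS (pvMkLk ks, vs) = (pvMkLk (ks ++ pvDkK (zs.map Prod.fst) ks), vs1)
      ∧ vs1.length = (ks ++ pvDkK (zs.map Prod.fst) ks).length
      ∧ (ks ++ pvDkK (zs.map Prod.fst) ks).Nodup
      ∧ ∀ (i : Nat) (hi : i < vs1.length) (hi2 : i < (ks ++ pvDkK (zs.map Prod.fst) ks).length),
          vs1[i] = pvCnt zs ((ks ++ pvDkK (zs.map Prod.fst) ks)[i])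
                      (vs.getD i PySem.Dict.empty) := by
  intro zs
  induction zs with
  | nil =>
    intro ks vs hlen hnd
    refine ⟨vs, by simp [pvDkK], by simp [pvDkK, hlen], by simpa [pvDkK] using hnd, ?_⟩
    intro i hi hi2
    simp only [pvCnt, List.foldl_nil]
    rw [pv_getD_lt vs i _ hi]
  | cons z r ih =>
    intro ks vs hlen hnd
    obtain ⟨k0, mk⟩ := z
    simp only [List.map_cons, List.foldl_cons]
    by_cases hmem : k0 ∈ ks
    · -- existing key: update slot idxOf k0
      have hi : ks.idxOf k0 < ks.length := List.idxOf_lt_length_of_mem hmem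
      set i := ks.idxOf k0 with hidef
      have hki : ks[i] = k0 := List.getElem_idxOf hi
      have hiv : i < vs.length := by omega
      have hA : pvStepS (pvMkLk ks, vs) (k0, mk)
          = (pvMkLk ks, vs.set i (pvUpdateCorpus vs[i] mk)) := by
        unfold pvStepS
        simp only
        rw [← hki, pvMkLk_get?_of_getElem ks hnd i hi]
        simp only [PySem.List.pyGetD_natCast, PySem.List.pySetD_natCast]
        rw [List.getD_eq_getElem vs _ hiv]
      rw [hA]
      obtain ⟨vs1, h1, h2, h3, h4⟩ := ih ks (vs.set i (pvUpdateCorpus vs[i] mk)) (by simp [hlen]) hnd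
      have hdk : pvDkK (k0 :: r.map Prod.fst) ks = pvDkK (r.map Prod.fst) ks := by
        simp [pvDkK, hmem]
      simp only [hdk]
      refine ⟨vs1, h1, h2, h3, ?_⟩
      intro j hj1 hj2
      rw [h4 j hj1 hj2]
      have hcnt : pvCnt ((k0, mk) :: r) ((ks ++ pvDkK (r.map Prod.fst) ks)[j])
            (vs.getD j PySem.Dict.empty)
          = pvCnt r ((ks ++ pvDkK (r.map Prod.fst) ks)[j])
              (if k0 == (ks ++ pvDkK (r.map Prod.fst) ks)[j] then
                 pvUpdateCorpus (vs.getD j PySem.Dict.empty) mk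
               else vs.getD j PySem.Dict.empty) := rfl
      rw [hcnt]
      congr 1
      by_cases hlt : j < ks.length
      · have hk2 : (ks ++ pvDkK (r.map Prod.fst) ks)[j] = ks[j] :=
          List.getElem_append_left hlt
        rw [hk2]
        by_cases heq : j = i
        · subst heq
          rw [hki]
          simp only [beq_self_eq_true, if_true]
          rw [pv_getD_lt _ _ _ (by simp; omega), pv_getD_lt vs _ _ (by omega)]
          simp
        · have hne : k0 ≠ ks[j] := by
            rw [← hki]; intro he
            exact heq ((List.Nodup.getElem_inj_iff hnd).1 he.symm)
          simp only [beq_iff_eq, hne, if_false]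
          rw [pv_getD_lt _ _ _ (by simp; omega), pv_getD_lt vs _ _ (by omega)]
          rw [List.getElem_set, if_neg (fun h : i = j => heq h.symm)]
      · have hge : ks.length ≤ j := by omega
        have hjd : j - ks.length < (pvDkK (r.map Prod.fst) ks).length := by
          have := hj2; simp [List.length_append] at this; omega
        have hk2 : (ks ++ pvDkK (r.map Prod.fst) ks)[j]
            = (pvDkK (r.map Prod.fst) ks)[j - ks.length]'hjd :=
          List.getElem_append_right hge
        have hne : k0 ≠ (ks ++ pvDkK (r.map Prod.fst) ks)[j] := by
          rw [hk2]
          intro he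
          have hmemdk : (pvDkK (r.map Prod.fst) ks)[j - ks.length]'hjd
              ∈ pvDkK (r.map Prod.fst) ks := List.getElem_mem _
          exact (List.nodup_append.mp h3).2.2 k0 hmem _ hmemdk he
        simp only [beq_iff_eq, hne, if_false]
        rw [pv_getD_ge _ _ _ (by simp; omega), pv_getD_ge vs _ _ (by omega)]
    · -- fresh key: append slot
      have hA : pvStepS (pvMkLk ks, vs) (k0, mk)
          = (pvMkLk (ks ++ [k0]), vs ++ [pvUpdateCorpus PySem.Dict.empty mk]) := by
        unfold pvStepS
        simp only
        rw [pvMkLk_get?_of_not_mem ks _ hmem]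
        simp only [pvMkLk_size, PySem.List.pyGetD_natCast, PySem.List.pySetD_natCast]
        rw [pvMkLk_insert_fresh ks _ hmem]
        refine congrArg _ ?_
        show ((vs ++ [PySem.Dict.empty]).set ks.length _) = _
        rw [← hlen, List.set_append_right _ _ (le_refl _)]
        congr 2
        rw [List.getD_eq_getElem (vs ++ [PySem.Dict.empty]) _ (by simp)]
        simp
      rw [hA]
      obtain ⟨vs1, h1, h2, h3, h4⟩ := ih (ks ++ [k0]) (vs ++ [pvUpdateCorpus PySem.Dict.empty mk])
        (by simp [hlen])
        (by simp [List.nodup_append, hnd]; intro a ha he; subst he; exact hmem ha)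
      have hdk : pvDkK (k0 :: r.map Prod.fst) ks = k0 :: pvDkK (r.map Prod.fst) (ks ++ [k0]) := by
        simp [pvDkK, hmem]
      have happ : ks ++ (k0 :: pvDkK (r.map Prod.fst) (ks ++ [k0]))
          = ks ++ [k0] ++ pvDkK (r.map Prod.fst) (ks ++ [k0]) := by
        simp
      simp only [hdk, happ]
      refine ⟨vs1, h1, h2, h3, ?_⟩
      intro j hj1 hj2
      rw [h4 j hj1 hj2]
      have hcnt : pvCnt ((k0, mk) :: r) ((ks ++ [k0] ++ pvDkK (r.map Prod.fst) (ks ++ [k0]))[j])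
            (vs.getD j PySem.Dict.empty)
          = pvCnt r ((ks ++ [k0] ++ pvDkK (r.map Prod.fst) (ks ++ [k0]))[j])
              (if k0 == (ks ++ [k0] ++ pvDkK (r.map Prod.fst) (ks ++ [k0]))[j] then
                 pvUpdateCorpus (vs.getD j PySem.Dict.empty) mk
               else vs.getD j PySem.Dict.empty) := rfl
      rw [hcnt]
      congr 1
      by_cases hlt : j < ks.length
      · have hk2 : (ks ++ [k0] ++ pvDkK (r.map Prod.fst) (ks ++ [k0]))[j] = ks[j] := by
          rw [List.getElem_append_left (by simp; omega : j < (ks ++ [k0]).length),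
              List.getElem_append_left hlt]
        rw [hk2]
        have hne : k0 ≠ ks[j] := fun he => hmem (he ▸ List.getElem_mem _)
        simp only [beq_iff_eq, hne, if_false]
        rw [pv_getD_lt _ _ _ (by simp; omega), pv_getD_lt vs _ _ (by omega)]
        exact List.getElem_append_left (by omega)
      · by_cases heq : j = ks.length
        · subst heq
          have hk2 : (ks ++ [k0] ++ pvDkK (r.map Prod.fst) (ks ++ [k0]))[ks.length]'hj2 = k0 := by
            rw [List.getElem_append_left (by simp : ks.length < (ks ++ [k0]).length)]
            simp
          rw [hk2]
          simp only [beq_self_eq_true, if_true]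
          rw [pv_getD_lt _ _ _ (by simp; omega), pv_getD_ge vs _ _ (by omega)]
          rw [List.getElem_append_right (by omega : vs.length ≤ ks.length)]
          simp [← hlen]
        · have hge : (ks ++ [k0]).length ≤ j := by simp; omega
          have hjd : j - (ks ++ [k0]).length < (pvDkK (r.map Prod.fst) (ks ++ [k0])).length := by
            have := hj2; simp [List.length_append] at this ⊢; omega
          have hk2 : (ks ++ [k0] ++ pvDkK (r.map Prod.fst) (ks ++ [k0]))[j]
              = (pvDkK (r.map Prod.fst) (ks ++ [k0]))[j - (ks ++ [k0]).length]'hjd :=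
            List.getElem_append_right hge
          have hne : k0 ≠ (ks ++ [k0] ++ pvDkK (r.map Prod.fst) (ks ++ [k0]))[j] := by
            rw [hk2]
            intro he
            have hmemdk : (pvDkK (r.map Prod.fst) (ks ++ [k0]))[j - (ks ++ [k0]).length]'hjd
                ∈ pvDkK (r.map Prod.fst) (ks ++ [k0]) := List.getElem_mem _
            exact (List.nodup_append.mp h3).2.2 k0 (by simp : k0 ∈ ks ++ [k0]) _ hmemdk he
          simp only [beq_iff_eq, hne, if_false]
          rw [pv_getD_ge _ _ _ (by simp; omega), pv_getD_ge vs _ _ (by omega)]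

-- A's rebuild loop over the lookup keys is the dict of the (keys, slots) zip
theorem pv_rebuild (ks : List String) (vs : List (PySem.Dict String Int))
    (hlen : vs.length = ks.length) (hnd : ks.Nodup) :
    (PySem.List.enumerate ks 0).foldl
        (fun d p => d.insert p.2 (PySem.List.pyGetD vs p.1 PySem.Dict.empty))
        PySem.Dict.empty
      = PySem.Dict.mk (ks.zip vs) := by
  apply PySem.Dict.ext
  rw [PySem.Dict.items_foldl_insert_fresh (PySem.List.enumerate ks 0) Prod.snd
        (fun p => PySem.List.pyGetD vs p.1 PySem.Dict.empty) PySem.Dict.empty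
        (fun a _ => by rw [PySem.Dict.contains_empty])
        (by rw [PySem.List.map_snd_enumerate]; exact hnd)]
  show [] ++ _ = ks.zip vs
  rw [List.nil_append]
  apply List.ext_getElem
  · simp [PySem.List.length_enumerate, List.length_zip]; omega
  · intro j hj1 hj2
    have hjk : j < ks.length := by
      simpa [PySem.List.length_enumerate] using hj1
    have hjv : j < vs.length := by omega
    simp only [List.getElem_map, PySem.List.getElem_enumerate, List.getElem_zip]
    simp only [Int.zero_add, PySem.List.pyGetD_natCast]
    rw [List.getD_eq_getElem vs _ hjv]

-- specialisation of pv_enum_getD_fold to A's loop, with the stringified zip on the right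
theorem pv_A_enum (mf cf : List (List Int)) (h : cf.length ≤ mf.length)
    (init : PySem.Dict String Int × List (PySem.Dict String Int)) :
    (PySem.List.enumerate cf 0).foldl
        (fun st p => pvStepS st (pvStringify p.2, pvStringify (PySem.List.pyGetD mf p.1 []))) init
      = ((cf.zip mf).map (fun p => (pvStringify p.1, pvStringify p.2))).foldl pvStepS init := by
  have h1 := pv_enum_getD_fold mf ([] : List Int)
      (fun st ch mel => pvStepS st (pvStringify ch, pvStringify mel)) cf 0 mf rfl h init
  rw [Nat.cast_zero] at h1
  exact h1.trans (Eq.symm List.foldl_map)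

-- specialisation of pv_enum_getD_fold to B's inner counting loop
theorem pv_B_enum (mks keys : List String) (h : keys.length ≤ mks.length) (k : String)
    (init : PySem.Dict String Int) :
    (PySem.List.enumerate keys 0).foldl
        (fun inn p => if p.2 == k then
            inn.insert (PySem.List.pyGetD mks p.1 "")
              (inn.getD (PySem.List.pyGetD mks p.1 "") 0 + 1)
          else inn) init
      = (keys.zip mks).foldl
          (fun inn p => if p.1 == k then inn.insert p.2 (inn.getD p.2 0 + 1) else inn) init := by
  have h1 := pv_enum_getD_fold mks ""
      (fun (inn : PySem.Dict String Int) kj mkv =>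
        if kj == k then inn.insert mkv (inn.getD mkv 0 + 1) else inn) keys 0 mks rfl h init
  rw [Nat.cast_zero] at h1
  exact h1

theorem pv_groupBy_nil (C : String → PySem.Dict String Int) (kl : List String) :
    kl.foldl (fun res k => if res.contains k then res else res.insert k (C k)) PySem.Dict.empty
      = PySem.Dict.mk ((pvDkK kl []).map (fun k => (k, C k))) := by
  have h0 : (PySem.Dict.mk (([] : List String).map (fun k => (k, C k)))) = PySem.Dict.empty := rfl
  rw [← h0, pv_groupBy C kl []]
  simp

-- ===== VERDICT (by name: the statement is the Claim_ definition above) =====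
theorem build_duo_corp_spec : Claim_equal_build_duo_corp := by
  intro c m _ hpre
  unfold Spec_build_duo_corp
  have hpre' : (pvFlatten c).length ≤ (pvFlatten m).length := hpre
  change
    (let st := (PySem.List.enumerate (pvFlatten c) 0).foldl
        (fun st p => pvStepS st (pvStringify p.2, pvStringify (PySem.List.pyGetD (pvFlatten m) p.1 [])))
        (pvMkLk [], ([] : List (PySem.Dict String Int)));
      ((PySem.List.enumerate st.1.keys 0).foldl
        (fun d p => d.insert p.2 (PySem.List.pyGetD st.2 p.1 PySem.Dict.empty))
        PySem.Dict.empty).items.map (fun kv => (kv.1, kv.2.items)))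
    = (let keys := (pvFlatten c).map pvStringify;
       let mks := (PySem.List.pyRange 0 (keys.length : Int) 1).map
          (fun i => pvStringify (PySem.List.pyGetD (pvFlatten m) i []));
       (keys.foldl
          (fun res k => if res.contains k then res
            else res.insert k
              ((PySem.List.enumerate keys 0).foldl
                (fun inn p => if p.2 == k then
                    inn.insert (PySem.List.pyGetD mks p.1 "")
                      (inn.getD (PySem.List.pyGetD mks p.1 "") 0 + 1)
                  else inn) PySem.Dict.empty))
          PySem.Dict.empty).items.map (fun kv => (kv.1, kv.2.items)))
  set keys := (pvFlatten c).map pvStringify with hkeysdef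
  set mks := (PySem.List.pyRange 0 (keys.length : Int) 1).map
      (fun i => pvStringify (PySem.List.pyGetD (pvFlatten m) i [])) with hmksdef
  set sps := ((pvFlatten c).zip (pvFlatten m)).map (fun p => (pvStringify p.1, pvStringify p.2))
      with hspsdef
  -- A side: loop over the zip, then the main invariant, then the rebuild
  rw [pv_A_enum (pvFlatten m) (pvFlatten c) hpre' (pvMkLk [], [])]
  obtain ⟨vs1, h1, h2, h3, h4⟩ := pv_mainA sps [] [] rfl List.nodup_nil
  simp only [List.nil_append] at h1 h2 h3 h4
  rw [h1]
  dsimp only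
  rw [pvMkLk_keys, pv_rebuild _ vs1 h2 h3]
  -- B side: the inner loops are the per-key counters over sps
  have hkl : keys.length = (pvFlatten c).length := by simp [hkeysdef]
  have hml : mks.length = keys.length := by
    simp [hmksdef, PySem.List.length_pyRange_one]
  have hzip : keys.zip mks = sps := by
    apply List.ext_getElem
    · simp [hspsdef, hkeysdef]
      omega
    · intro i hi1 hi2
      have hik : i < keys.length := by simp [List.length_zip] at hi1; omega
      have hic : i < (pvFlatten c).length := by omega
      have him : i < (pvFlatten m).length := by omega
      have himk : i < mks.length := by omega
      simp only [List.getElem_zip, hspsdef, List.getElem_map, List.getElem_zip]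
      rw [Prod.mk.injEq]
      refine ⟨?_, ?_⟩
      · simp [hkeysdef]
      · show mks[i] = pvStringify ((pvFlatten m)[i])
        simp only [hmksdef, List.getElem_map]
        rw [PySem.List.getElem_pyRange_one]
        simp only [Int.zero_add]
        rw [PySem.List.pyGetD_natCast, List.getD_eq_getElem _ _ him]
  have hinner : ∀ k : String,
      (PySem.List.enumerate keys 0).foldl
        (fun inn p => if p.2 == k then
            inn.insert (PySem.List.pyGetD mks p.1 "")
              (inn.getD (PySem.List.pyGetD mks p.1 "") 0 + 1)
          else inn) PySem.Dict.empty = pvCnt sps k PySem.Dict.empty := by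
    intro k
    rw [pv_B_enum mks keys (by omega) k PySem.Dict.empty, hzip]
    unfold pvCnt
    congr 1
    funext d p
    by_cases h : p.1 == k
    · simp [h, pvUpdateCorpus_eq]
    · simp [h]
  have houter : (fun (res : PySem.Dict String (PySem.Dict String Int)) k =>
        if res.contains k then res
        else res.insert k
          ((PySem.List.enumerate keys 0).foldl
            (fun inn p => if p.2 == k then
                inn.insert (PySem.List.pyGetD mks p.1 "")
                  (inn.getD (PySem.List.pyGetD mks p.1 "") 0 + 1)
              else inn) PySem.Dict.empty))
      = (fun res k => if res.contains k then res
          else res.insert k (pvCnt sps k PySem.Dict.empty)) := by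
    funext res k
    rw [hinner k]
  rw [houter, pv_groupBy_nil (fun k => pvCnt sps k PySem.Dict.empty) keys]
  -- both sides are the dict of the distinct keys with their counters
  have hfst : sps.map Prod.fst = keys := by
    rw [hspsdef, List.map_map]
    have : (Prod.fst ∘ fun p : List Int × List Int => (pvStringify p.1, pvStringify p.2))
        = pvStringify ∘ Prod.fst := rfl
    rw [this, ← List.map_map, List.map_fst_zip hpre', hkeysdef]
  rw [hfst] at h2 h3 h4 ⊢
  have hzv : (pvDkK keys []).zip vs1
      = (pvDkK keys []).map (fun k => (k, pvCnt sps k PySem.Dict.empty)) := by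
    apply List.ext_getElem
    · simp only [List.length_zip, List.length_map]; omega
    · intro i hi1 hi2
      have hik : i < (pvDkK keys []).length := by simpa using hi2
      have hiv : i < vs1.length := by omega
      simp only [List.getElem_zip, List.getElem_map]
      rw [Prod.mk.injEq]
      refine ⟨?_, ?_⟩
      · rfl
      · show vs1[i] = pvCnt sps ((pvDkK keys [])[i]) PySem.Dict.empty
        rw [h4 i hiv hik, pv_getD_ge _ _ _ (by simp)]
  rw [hzv]
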